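-- pv_equiv track=rewrite | github.com/MuhammadMubashir5/cyberheaders-frontend | CyberHeaders/CyberHeaders/api/utils/headers.py | analyze_cookies
-- ===== SOURCE A (Python) =====
-- def analyze_cookies(cookie_header):
--     issues = []
--     cookies = [c.strip() for c in cookie_header.split(";")]
--
--     if not any("secure" in c.lower() for c in cookies):
--         issues.append("Missing Secure flag")
--
--     if not any("httponly" in c.lower() for c in cookies):
--         issues.append("Missing HttpOnly flag")
--
--     samesite = next((c for c in cookies if "samesite" in c.lower()), None)
--     if not samesite:
--         issues.append("Missing SameSite attribute")
--     elif "samesite=none" in samesite.lower() and not any("secure" in c.lower() for c in cookies):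
--         issues.append("SameSite=None without Secure flag")
--
--     if any("domain=" in c.lower() for c in cookies):
--         issues.append("Overly broad domain setting")
--
--     return issues
-- ===== SOURCE B (Python) =====
-- def analyze_cookies(cookie_header):
--     # single pass over the stripped cookies, then emit issues in A's order
--     has_secure = has_httponly = has_domain = False
--     samesite = None
--     for raw in cookie_header.split(";"):
--         c = raw.strip()
--         cl = c.lower()
--         if "secure" in cl:
--             has_secure = True
--         if "httponly" in cl:
--             has_httponly = True
--         if "domain=" in cl:
--             has_domain = True
--         if samesite is None and "samesite" in cl:
--             samesite = c
--     issues = []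
--     if not has_secure:
--         issues.append("Missing Secure flag")
--     if not has_httponly:
--         issues.append("Missing HttpOnly flag")
--     if samesite is None:
--         issues.append("Missing SameSite attribute")
--     elif "samesite=none" in samesite.lower() and not has_secure:
--         issues.append("SameSite=None without Secure flag")
--     if has_domain:
--         issues.append("Overly broad domain setting")
--     return issues
-- ===== Notes on version B (the rewrite author's own statement) =====
-- stated objective: alternative
-- what changed: Replaces A's four separate scans of the cookie list (three any() generator scans plus a next() search) with one loop that sets has_secure/has_httponly/has_domain flags and records the first samesite cookie, then emits the issues in the same order.
import Mathlib
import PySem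

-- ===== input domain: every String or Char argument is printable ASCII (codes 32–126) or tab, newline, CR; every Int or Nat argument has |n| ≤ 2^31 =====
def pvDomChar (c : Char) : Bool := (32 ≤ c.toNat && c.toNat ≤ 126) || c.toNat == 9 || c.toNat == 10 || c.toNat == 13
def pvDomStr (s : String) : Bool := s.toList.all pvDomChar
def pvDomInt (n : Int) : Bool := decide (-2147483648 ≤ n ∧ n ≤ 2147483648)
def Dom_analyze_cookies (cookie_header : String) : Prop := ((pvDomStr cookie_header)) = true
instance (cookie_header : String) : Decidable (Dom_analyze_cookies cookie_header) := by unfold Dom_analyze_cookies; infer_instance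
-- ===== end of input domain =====

-- B replaces A's four separate scans of the cookie list by one accumulating pass (alternative decomposition, same cost class).

-- ===== PORT A =====
def analyze_cookies (cookie_header : String) : List String :=
  let issues : List String := []
  let cookies := ((PySem.Str.split? cookie_header ";").getD []).map PySem.Str.strip
  let issues := if !(cookies.any (fun c => PySem.Str.isIn "secure" (PySem.Str.lower c))) then
      issues ++ ["Missing Secure flag"] else issues
  let issues := if !(cookies.any (fun c => PySem.Str.isIn "httponly" (PySem.Str.lower c))) then
      issues ++ ["Missing HttpOnly flag"] else issues
  let samesite := cookies.find? (fun c => PySem.Str.isIn "samesite" (PySem.Str.lower c))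
  let issues := match samesite with
    | none => issues ++ ["Missing SameSite attribute"]
    | some s =>
      if PySem.Str.isIn "samesite=none" (PySem.Str.lower s)
          && !(cookies.any (fun c => PySem.Str.isIn "secure" (PySem.Str.lower c))) then
        issues ++ ["SameSite=None without Secure flag"] else issues
  let issues := if cookies.any (fun c => PySem.Str.isIn "domain=" (PySem.Str.lower c)) then
      issues ++ ["Overly broad domain setting"] else issues
  issues

-- ===== PORT B =====
-- loop body of Source B: state = (has_secure, has_httponly, has_domain, first samesite cookie)
def acStep (st : Bool × Bool × Bool × Option String) (raw : String) :
    Bool × Bool × Bool × Option String :=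
  let c := PySem.Str.strip raw
  let cl := PySem.Str.lower c
  (st.1 || PySem.Str.isIn "secure" cl,
   st.2.1 || PySem.Str.isIn "httponly" cl,
   st.2.2.1 || PySem.Str.isIn "domain=" cl,
   match st.2.2.2 with
   | some x => some x
   | none => if PySem.Str.isIn "samesite" cl then some c else none)

def analyze_cookies_alt (cookie_header : String) : List String :=
  let st := ((PySem.Str.split? cookie_header ";").getD []).foldl acStep (false, false, false, none)
  let issues : List String := []
  let issues := if !st.1 then issues ++ ["Missing Secure flag"] else issues
  let issues := if !st.2.1 then issues ++ ["Missing HttpOnly flag"] else issues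
  let issues := match st.2.2.2 with
    | none => issues ++ ["Missing SameSite attribute"]
    | some s =>
      if PySem.Str.isIn "samesite=none" (PySem.Str.lower s) && !st.1 then
        issues ++ ["SameSite=None without Secure flag"] else issues
  let issues := if st.2.2.1 then issues ++ ["Overly broad domain setting"] else issues
  issues

-- ===== PRECONDITION & SPEC =====
def Spec_analyze_cookies (cookie_header : String) (out : List String) : Prop := out = analyze_cookies_alt cookie_header
instance (cookie_header : String) (out : List String) : Decidable (Spec_analyze_cookies cookie_header out) := by unfold Spec_analyze_cookies; infer_instance

-- ===== CLAIM (what is proved, stated in full; the proofs are below) =====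
def Claim_equal_analyze_cookies : Prop := ∀ (cookie_header : String), Dom_analyze_cookies cookie_header → Spec_analyze_cookies cookie_header (analyze_cookies cookie_header)

-- ===== LEMMAS AND PROOFS =====

-- the loop's invariant: the foldl computes exactly A's three any-scans and first-match search
theorem acStep_foldl (xs : List String) (a b d : Bool) (o : Option String) :
    xs.foldl acStep (a, b, d, o) =
      (a || (xs.map PySem.Str.strip).any (fun c => PySem.Str.isIn "secure" (PySem.Str.lower c)),
       b || (xs.map PySem.Str.strip).any (fun c => PySem.Str.isIn "httponly" (PySem.Str.lower c)),
       d || (xs.map PySem.Str.strip).any (fun c => PySem.Str.isIn "domain=" (PySem.Str.lower c)),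
       o.or ((xs.map PySem.Str.strip).find? (fun c => PySem.Str.isIn "samesite" (PySem.Str.lower c)))) := by
  induction xs generalizing a b d o with
  | nil => simp
  | cons x xs ih =>
    simp only [List.foldl_cons, acStep, List.map_cons, List.any_cons, List.find?_cons]
    rw [ih]
    cases o with
    | some v => simp [Bool.or_assoc]
    | none =>
      by_cases h : PySem.Str.isIn "samesite" (PySem.Str.lower (PySem.Str.strip x)) = true <;>
        simp_all [Bool.or_assoc, Option.or]

-- ===== VERDICT (by name: the statement is the Claim_ definition above) =====
theorem analyze_cookies_spec : Claim_equal_analyze_cookies := by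
  intro s _
  show analyze_cookies s = analyze_cookies_alt s
  unfold analyze_cookies analyze_cookies_alt
  rw [acStep_foldl]
  simp only [Bool.false_or, Option.none_or]
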